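-- pv_equiv track=rewrite | github.com/qkreltms/problem-solvings | 힙/더_맵게/1회차.py | solution
-- ===== SOURCE A (Python) =====
-- def solution(scov, k):
--   cnt = 0
--   while scov:
--     flag = True
--     for i in scov:
--       if i < k:
--         flag = False
--         break
--     if flag:
--       return cnt
--     if len(scov) < 2:
--       if scov[0] < k:
--         return -1
--       return cnt
--     a = min(scov)
--     scov.remove(a)
--     b = min(scov)
--     scov.remove(b)
--     c = a + b * 2
--     cnt += 1
--     scov.append(c)
--
--   return -1
-- ===== SOURCE B (Python) =====
-- def solution(scov, k):
--     lst = sorted(scov)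
--     cnt = 0
--     while lst:
--         if lst[0] >= k:
--             return cnt
--         if len(lst) < 2:
--             return -1
--         c = lst[0] + 2 * lst[1]
--         del lst[:2]
--         lo, hi = 0, len(lst)
--         while lo < hi:
--             mid = (lo + hi) // 2
--             if lst[mid] < c:
--                 lo = mid + 1
--             else:
--                 hi = mid
--         lst.insert(lo, c)
--         cnt += 1
--     return -1
-- ===== Notes on version B (the rewrite author's own statement) =====
-- stated objective: faster
-- what changed: B sorts once and keeps the working list sorted, combining the first two elements and re-inserting via hand-written binary search, instead of A's per-round full scans (an all-elements check, two min scans and two remove scans).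
import Mathlib
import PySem

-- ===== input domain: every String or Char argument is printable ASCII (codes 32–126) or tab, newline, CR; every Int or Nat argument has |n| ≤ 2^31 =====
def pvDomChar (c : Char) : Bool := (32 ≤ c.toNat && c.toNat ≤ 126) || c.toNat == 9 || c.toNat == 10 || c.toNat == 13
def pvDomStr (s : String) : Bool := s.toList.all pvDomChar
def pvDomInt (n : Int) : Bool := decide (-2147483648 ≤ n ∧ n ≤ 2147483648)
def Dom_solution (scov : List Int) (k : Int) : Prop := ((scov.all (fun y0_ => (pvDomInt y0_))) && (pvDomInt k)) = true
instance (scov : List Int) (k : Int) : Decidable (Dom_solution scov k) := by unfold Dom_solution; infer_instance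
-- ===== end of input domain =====

-- B keeps a sorted working list (sort once, combine the first two, binary-search re-insert)
-- instead of A's per-round full scans. Note: Python A mutates its scov argument in place
-- (remove/append); B does not — the equivalence proved here is about the return value only.

-- ===== PORT A =====

-- helper used by solGo's termination proof (cited in decreasing_by)
theorem pv_remove_len {xs s : List Int} {v : Int}
    (h : PySem.List.remove? xs v = some s) : s.length + 1 = xs.length := by
  have hv : v ∈ xs := by
    by_contra hv
    rw [(PySem.List.remove?_eq_none_iff xs v).mpr hv] at h
    cases h
  rw [PySem.List.remove?_eq_some_erase xs v hv] at h
  cases h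
  have := List.length_erase_of_mem hv
  have : xs.length ≠ 0 := by
    intro h0
    rw [List.length_eq_zero_iff] at h0
    subst h0; cases hv
  simp [List.length_erase_of_mem hv]
  omega

-- literal port of A: while scov: flag-scan; all ≥ k → cnt; single element; min/remove twice; append
def solGo (scov : List Int) (k : Int) (cnt : Int) : Int :=
  if hne : scov = [] then -1
  else
    -- for i in scov: if i < k: flag = False; break
    if scov.all (fun i => !(i < k)) then cnt
    else if scov.length < 2 then
      (match scov with
       | [] => -1                      -- unreachable (scov ≠ [])
       | x :: _ => if x < k then -1 else cnt)
    else
      match hm1 : PySem.List.min? scov (fun x => x) with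
      | none => -1                     -- unreachable (scov ≠ [])
      | some a =>
        match hr1 : PySem.List.remove? scov a with
        | none => -1                   -- unreachable (a ∈ scov)
        | some s1 =>
          match hm2 : PySem.List.min? s1 (fun x => x) with
          | none => -1                 -- unreachable (len ≥ 2)
          | some b =>
            match hr2 : PySem.List.remove? s1 b with
            | none => -1               -- unreachable (b ∈ s1)
            | some s2 => solGo (s2 ++ [a + b * 2]) k (cnt + 1)
termination_by scov.length
decreasing_by
  have h1 := pv_remove_len hr1
  have h2 := pv_remove_len hr2
  simp only [List.length_append, List.length_cons, List.length_nil]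
  omega

def solution (scov : List Int) (k : Int) : Int := solGo scov k 0

-- ===== PORT B =====

-- Source B's hand-written binary search: while lo < hi: mid = (lo+hi)//2; …
-- (lo, hi, mid are list indices, always ≥ 0, so Nat division is exactly Python's //)
def bisGo (lst : List Int) (c : Int) (lo hi : Nat) : Nat :=
  if lo < hi then
    let mid := (lo + hi) / 2
    if PySem.List.pyGetD lst (mid : Int) 0 < c then bisGo lst c (mid + 1) hi
    else bisGo lst c lo mid
  else lo
termination_by hi - lo
decreasing_by all_goals omega

-- Source B's main loop: lst sorted; lst[0] ≥ k → cnt; len < 2 → -1; c = lst[0]+2*lst[1];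
-- del lst[:2]; binary-search position; lst.insert(pos, c)
def solAltGo (lst : List Int) (k : Int) (cnt : Int) : Int :=
  match lst with
  | [] => -1
  | x :: rest =>
    if k ≤ x then cnt
    else
      match rest with
      | [] => -1
      | y :: rest2 =>
        let c := x + 2 * y
        let pos := bisGo rest2 c 0 rest2.length
        solAltGo (PySem.List.insert rest2 (pos : Int) c) k (cnt + 1)
termination_by lst.length
decreasing_by
  simp [PySem.List.length_insert]

def solution_alt (scov : List Int) (k : Int) : Int :=
  solAltGo (PySem.List.sorted scov (fun x => x) false) k 0

-- ===== PRECONDITION & SPEC =====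
def Spec_solution (scov : List Int) (k : Int) (out : Int) : Prop := out = solution_alt scov k
instance (scov : List Int) (k : Int) (out : Int) : Decidable (Spec_solution scov k out) := by unfold Spec_solution; infer_instance

-- ===== CLAIM (what is proved, stated in full; the proofs are below) =====
def Claim_equal_solution : Prop := ∀ (scov : List Int) (k : Int), Dom_solution scov k → Spec_solution scov k (solution scov k)

-- ===== LEMMAS AND PROOFS =====

-- binary-search invariant: bisGo finds L, the unique split point characterised by hch
theorem pv_bis_inv : ∀ (fuel : Nat) (xs : List Int) (c : Int) (L lo hi : Nat),
    hi - lo ≤ fuel → (∀ (i : Nat) (h : i < xs.length), (xs[i] < c ↔ i < L)) →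
    lo ≤ L → L ≤ hi → hi ≤ xs.length → bisGo xs c lo hi = L := by
  intro fuel
  induction fuel with
  | zero =>
    intro xs c L lo hi hf hch hlo hhi hlen
    rw [bisGo]
    have h : ¬ lo < hi := by omega
    simp only [if_neg h]
    omega
  | succ f ih =>
    intro xs c L lo hi hf hch hlo hhi hlen
    rw [bisGo]
    by_cases h : lo < hi
    · simp only [if_pos h]
      have hmlen : (lo + hi) / 2 < xs.length := by omega
      rw [PySem.List.pyGetD_natCast, List.getD_eq_getElem xs 0 hmlen]
      by_cases hc : xs[(lo + hi) / 2] < c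
      · rw [if_pos hc]
        have := (hch _ hmlen).mp hc
        exact ih xs c L ((lo + hi) / 2 + 1) hi (by omega) hch (by omega) hhi hlen
      · rw [if_neg hc]
        have := (hch _ hmlen).not.mp hc
        exact ih xs c L lo ((lo + hi) / 2) (by omega) hch hlo (by omega) (by omega)
    · simp only [if_neg h]; omega

theorem pv_dropWhile_ge (xs : List Int) (c : Int) (hs : xs.Pairwise (· ≤ ·)) :
    ∀ b ∈ xs.dropWhile (fun v => decide (v < c)), c ≤ b := by
  intro b hb
  set p : Int → Bool := fun v => decide (v < c) with hp
  have hsub : xs.dropWhile p <:+ xs := List.dropWhile_suffix p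
  have hpd : (xs.dropWhile p).Pairwise (· ≤ ·) := hs.sublist hsub.sublist
  cases hd : xs.dropWhile p with
  | nil => rw [hd] at hb; cases hb
  | cons d D =>
    have hne : xs.dropWhile p ≠ [] := by rw [hd]; simp
    have hdc : p d = false := by
      have h2 := List.head_dropWhile_not p hne
      simpa [hd] using h2
    rw [hp] at hdc
    simp only [decide_eq_false_iff_not] at hdc
    rw [hd] at hb hpd
    rcases List.mem_cons.mp hb with hb | hb
    · omega
    · have := (List.pairwise_cons.mp hpd).1 b hb
      omega

-- the split point of a sorted list is the takeWhile length
theorem pv_split_char (xs : List Int) (c : Int) (hs : xs.Pairwise (· ≤ ·)) :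
    ∀ (i : Nat) (h : i < xs.length),
      (xs[i] < c ↔ i < (xs.takeWhile (fun v => decide (v < c))).length) := by
  set p : Int → Bool := fun v => decide (v < c) with hp
  set L := (xs.takeWhile p).length with hL
  have hTD : xs.takeWhile p ++ xs.dropWhile p = xs := List.takeWhile_append_dropWhile
  have htake : xs.takeWhile p = xs.take L := List.prefix_iff_eq_take.mp (List.takeWhile_prefix p)
  have hdrop : xs.dropWhile p = xs.drop L := by
    conv_rhs => rw [← hTD]
    rw [List.drop_left' hL.symm]
  have hLlen : L ≤ xs.length := (List.takeWhile_prefix p).length_le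
  intro i hi
  constructor
  · intro hlt
    by_contra hge
    have hLi : L ≤ i := by omega
    have hmemD : xs[L] ∈ xs.dropWhile p := by
      rw [hdrop]
      have h0 : 0 < (xs.drop L).length := by
        rw [List.length_drop]; omega
      have : (xs.drop L)[0]'h0 = xs[L] := by
        simp
      rw [← this]
      exact List.getElem_mem _
    have hcL : c ≤ xs[L] := pv_dropWhile_ge xs c hs _ hmemD
    have hLle : xs[L] ≤ xs[i] := by
      rcases Nat.eq_or_lt_of_le hLi with hEq | hlt2
      · subst hEq; exact le_refl _
      · exact (List.pairwise_iff_getElem.mp hs) L i (by omega) hi hlt2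
    omega
  · intro hiL
    have hmemT : xs[i] ∈ xs.takeWhile p := by
      rw [htake]
      have hiT : i < (xs.take L).length := by
        rw [List.length_take]; omega
      have : (xs.take L)[i]'hiT = xs[i] := List.getElem_take
      rw [← this]
      exact List.getElem_mem _
    have := List.mem_takeWhile_imp hmemT
    rw [hp] at this
    simpa using this

-- the ordered-insert step of B: binary search + insert = takeWhile ++ c :: dropWhile
theorem pv_insert_sorted (xs : List Int) (c : Int) (hs : xs.Pairwise (· ≤ ·)) :
    PySem.List.insert xs ((bisGo xs c 0 xs.length : Nat) : Int) c
      = xs.takeWhile (fun v => decide (v < c)) ++ c :: xs.dropWhile (fun v => decide (v < c)) := by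
  set p : Int → Bool := fun v => decide (v < c) with hp
  set L := (xs.takeWhile p).length with hL
  have hpre : xs.takeWhile p <+: xs := List.takeWhile_prefix p
  have hLlen : L ≤ xs.length := hpre.length_le
  have hbis : bisGo xs c 0 xs.length = L :=
    pv_bis_inv (xs.length) xs c L 0 xs.length (by omega)
      (pv_split_char xs c hs) (by omega) hLlen (le_refl _)
  rw [hbis, PySem.List.insert_natCast xs L c hLlen]
  congr 1
  · exact (List.prefix_iff_eq_take.mp hpre).symm
  · congr 1
    conv_lhs => rw [← List.takeWhile_append_dropWhile (p := p) (l := xs)]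
    rw [List.drop_left' hL.symm]

-- min(scov) is the head of any sorted rearrangement
theorem pv_min_perm {scov : List Int} {x : Int} {rest : List Int}
    (hperm : (x :: rest).Perm scov) (hs : (x :: rest).Pairwise (· ≤ ·)) :
    PySem.List.min? scov (fun v => v) = some x := by
  cases hm : PySem.List.min? scov (fun v => v) with
  | none =>
    rw [PySem.List.min?_eq_none_iff] at hm
    subst hm
    have := hperm.length_eq
    simp at this
  | some m =>
    have hmem : m ∈ x :: rest := hperm.mem_iff.mpr (PySem.List.min?_mem hm)
    have hxmem : x ∈ scov := hperm.subset (List.mem_cons_self)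
    have h1 : m ≤ x := PySem.List.min?_isMin hm x hxmem
    have h2 : x ≤ m := by
      rcases List.mem_cons.mp hmem with h | h
      · omega
      · exact (List.pairwise_cons.mp hs).1 m h
    have : m = x := le_antisymm h1 h2
    rw [this]

theorem solAltGo_nil (k cnt : Int) : solAltGo [] k cnt = -1 := by
  rw [solAltGo.eq_def]

theorem solAltGo_cons_ge (x : Int) (rest : List Int) (k cnt : Int) (h : k ≤ x) :
    solAltGo (x :: rest) k cnt = cnt := by
  rw [solAltGo.eq_def]; simp [h]

theorem solAltGo_single (x : Int) (k cnt : Int) (h : ¬ k ≤ x) :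
    solAltGo [x] k cnt = -1 := by
  rw [solAltGo.eq_def]; simp [h]

theorem solAltGo_step (x y : Int) (rest2 : List Int) (k cnt : Int) (h : ¬ k ≤ x) :
    solAltGo (x :: y :: rest2) k cnt
      = solAltGo (PySem.List.insert rest2 ((bisGo rest2 (x + 2 * y) 0 rest2.length : Nat) : Int) (x + 2 * y)) k (cnt + 1) := by
  rw [solAltGo.eq_def]; simp [h]

theorem pv_main : ∀ (n : Nat) (scov lst : List Int) (k cnt : Int),
    scov.length = n → lst.Perm scov → lst.Pairwise (· ≤ ·) →
    solGo scov k cnt = solAltGo lst k cnt := by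
  intro n
  induction n with
  | zero =>
    intro scov lst k cnt hlen hperm _
    have hs : scov = [] := by cases scov <;> simp_all
    have hl : lst = [] := by
      have := hperm.length_eq
      rw [hs] at this
      cases lst <;> simp_all
    subst hs hl
    rw [solGo, solAltGo_nil]
    simp
  | succ m ih =>
    intro scov lst k cnt hlen hperm hsort
    cases lst with
    | nil =>
      have := hperm.length_eq
      simp [← this] at hlen
    | cons x rest =>
      have hne : scov ≠ [] := by
        intro h
        have := hperm.length_eq
        simp [h] at this
      rw [solGo]
      simp only [dif_neg hne]
      by_cases hk : k ≤ x
      · -- every element ≥ k: both return cnt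
        have hall : scov.all (fun i => !(i < k)) = true := by
          rw [List.all_eq_true]
          intro i hi
          have hi' : i ∈ x :: rest := hperm.mem_iff.mpr hi
          have hxi : x ≤ i := by
            rcases List.mem_cons.mp hi' with h | h
            · omega
            · exact (List.pairwise_cons.mp hsort).1 i h
          simp; omega
        rw [if_pos hall, solAltGo_cons_ge x rest k cnt hk]
      · -- min x < k
        have hxk : x < k := by omega
        have hall : ¬ scov.all (fun i => !(i < k)) = true := by
          rw [List.all_eq_true]
          intro habs
          have := habs x (hperm.subset (List.mem_cons_self))
          simp at this
          omega
        rw [if_neg hall]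
        cases rest with
        | nil =>
          -- single element < k: both -1
          have hsc : scov = [x] := List.perm_singleton.mp hperm.symm
          rw [solAltGo_single x k cnt hk]
          subst hsc
          simp [hxk]
        | cons y rest2 =>
          have hlen2 : scov.length = rest2.length + 2 := by
            have := hperm.length_eq
            simpa using this.symm
          have hnot2 : ¬ scov.length < 2 := by omega
          rw [if_neg hnot2]
          -- a = min = x
          have hm1 : PySem.List.min? scov (fun v => v) = some x := pv_min_perm hperm hsort
          have hxmem : x ∈ scov := hperm.subset (List.mem_cons_self)
          have hr1 : PySem.List.remove? scov x = some (scov.erase x) :=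
            PySem.List.remove?_eq_some_erase scov x hxmem
          have hperm1 : (y :: rest2).Perm (scov.erase x) := by
            have := hperm.erase x
            simpa using this
          have hsort1 : (y :: rest2).Pairwise (· ≤ ·) := (List.pairwise_cons.mp hsort).2
          have hm2 : PySem.List.min? (scov.erase x) (fun v => v) = some y :=
            pv_min_perm hperm1 hsort1
          have hymem : y ∈ scov.erase x := hperm1.subset (List.mem_cons_self)
          have hr2 : PySem.List.remove? (scov.erase x) y = some ((scov.erase x).erase y) :=
            PySem.List.remove?_eq_some_erase _ y hymem
          have hperm2 : rest2.Perm ((scov.erase x).erase y) := by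
            have := hperm1.erase y
            simpa using this
          have hsort2 : rest2.Pairwise (· ≤ ·) := (List.pairwise_cons.mp hsort1).2
          rw [solAltGo_step x y rest2 k cnt hk]
          -- reduce A's nested matches using hm1/hr1/hm2/hr2
          split
          · rename_i hnone; rw [hm1] at hnone; cases hnone
          rename_i a ha; rw [hm1] at ha; injection ha with ha; subst ha
          split
          · rename_i hnone; rw [hr1] at hnone; cases hnone
          rename_i s1 hs1; rw [hr1] at hs1; injection hs1 with hs1; subst hs1
          split
          · rename_i hnone; rw [hm2] at hnone; cases hnone
          rename_i b hb; rw [hm2] at hb; injection hb with hb; subst hb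
          split
          · rename_i hnone; rw [hr2] at hnone; cases hnone
          rename_i s2 hs2; rw [hr2] at hs2; injection hs2 with hs2; subst hs2
          -- rewrite B's inserted list
          have hins := pv_insert_sorted rest2 (x + 2 * y) hsort2
          set c := x + 2 * y with hc
          set T := rest2.takeWhile (fun v => decide (v < c)) with hT
          set D := rest2.dropWhile (fun v => decide (v < c)) with hD
          have hTD : T ++ D = rest2 := List.takeWhile_append_dropWhile
          -- apply the IH
          have hxy : x + y * 2 = c := by rw [hc]; ring
          rw [hins, hxy]
          apply ih
          · -- length
            have : ((scov.erase x).erase y).length + 1 = (scov.erase x).length :=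
              by rw [List.length_erase_of_mem hymem]; have : (scov.erase x).length ≠ 0 := by
                   intro h0; rw [List.length_eq_zero_iff] at h0; rw [h0] at hymem; cases hymem
                 omega
            have h2 : (scov.erase x).length + 1 = scov.length := by
              rw [List.length_erase_of_mem hxmem]
              have : scov.length ≠ 0 := by intro h0; rw [List.length_eq_zero_iff] at h0; exact hne h0
              omega
            simp only [List.length_append, List.length_cons, List.length_nil]
            omega
          · -- permutation: T ++ c :: D ~ (erase erase) ++ [c]
            refine List.Perm.trans List.perm_middle ?_
            rw [hTD]
            exact (hperm2.cons c).trans (List.perm_append_singleton c _).symm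
          · -- sortedness of T ++ c :: D
            rw [List.pairwise_append]
            refine ⟨?_, ?_, ?_⟩
            · exact hsort2.sublist (hTD ▸ List.sublist_append_left T D)
            · rw [List.pairwise_cons]
              exact ⟨pv_dropWhile_ge rest2 c hsort2,
                     hsort2.sublist (hTD ▸ List.sublist_append_right T D)⟩
            · intro a ha b hb
              have hac : a < c := by
                have := List.mem_takeWhile_imp (hT ▸ ha)
                simpa using this
              rcases List.mem_cons.mp hb with hb | hb
              · omega
              · have hcb := pv_dropWhile_ge rest2 c hsort2 b (hD ▸ hb)
                omega

-- ===== VERDICT (by name: the statement is the Claim_ definition above) =====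
theorem solution_spec : Claim_equal_solution := by
  intro scov k _
  unfold Spec_solution solution solution_alt
  exact pv_main scov.length scov _ k 0 rfl
    (PySem.List.sorted_perm scov (fun x => x) false)
    (PySem.List.sorted_pairwise scov (fun x => x))
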